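-- pv_equiv track=rewrite | github.com/SolarLunix/SLST | Concatenator.py | concatenator
-- ===== SOURCE A (Python) =====
-- def concatenator(fragments):
--     out = {}
--     count = 0
--     for frag in fragments:
--         # for each dictionary passed in look at the keys in the dictionary
--         for strain in frag:
--             # for each key in the dictionary take the value for the key and add it to the same key in the output
--             try:
--                 out[strain] += frag[strain]
--             except KeyError:
--                 # if the key doesn't exist, create it.
--                 out[strain] = count*'-' + frag[strain]
--         # make sure all the fragments line up to be the same size and add - where they don't.
--         count = max([len(out[i]) for i in out])
--         for strain in out:
--             while len(out[strain]) < count: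
--                 out[strain] += '-'
--
--     return out
-- ===== SOURCE B (Python) =====
-- def concatenator(fragments):
--     # Transposed construction: one pass collects strain keys in first-seen order
--     # and each fragment's column width; then each strain's value is built directly
--     # by joining per-fragment blocks padded with '-' to that fragment's width.
--     order = []
--     seen = set()
--     widths = []
--     for frag in fragments:
--         widths.append(max((len(v) for v in frag.values()), default=0))
--         for strain in frag:
--             if strain not in seen:
--                 seen.add(strain)
--                 order.append(strain)
--     return {strain: ''.join(frag.get(strain, '').ljust(w, '-')
--                             for frag, w in zip(fragments, widths))
--             for strain in order}
-- ===== Notes on version B (the rewrite author's own statement) =====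
-- stated objective: faster
-- what changed: A grows one table, appending each fragment's pieces and re-padding every row of the whole table after every round; B makes one transposed pass collecting first-seen key order and per-fragment column widths, then builds each row once as the join of per-fragment blocks padded to their fragment's width.
-- crash fix: A raises ValueError (max of an empty list, since out is still empty) exactly when the first fragment is an empty dict; B returns the padded table of the keys it collected on those inputs. — e.g. on concatenator([[]]): A raises ValueError, B returns []
import Mathlib
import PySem

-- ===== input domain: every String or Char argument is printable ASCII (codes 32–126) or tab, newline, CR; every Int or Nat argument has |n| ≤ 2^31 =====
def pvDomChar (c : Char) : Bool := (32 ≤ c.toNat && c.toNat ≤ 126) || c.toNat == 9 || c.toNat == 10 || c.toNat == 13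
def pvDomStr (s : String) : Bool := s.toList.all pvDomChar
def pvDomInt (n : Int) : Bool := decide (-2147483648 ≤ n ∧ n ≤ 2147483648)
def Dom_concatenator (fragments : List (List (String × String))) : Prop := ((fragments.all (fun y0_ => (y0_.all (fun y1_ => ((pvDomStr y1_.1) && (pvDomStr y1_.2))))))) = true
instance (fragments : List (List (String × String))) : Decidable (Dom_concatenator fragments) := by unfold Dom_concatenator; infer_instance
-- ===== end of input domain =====

-- B replaces A's append-then-repad-the-whole-table rounds by a transposed construction
-- (first-seen key order + per-fragment widths in one pass, then each value built directly).

-- ===== PORT A =====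
-- Python string values are modelled as List Char (PySem convention); each dict argument
-- is modelled by PySem.Dict.ofList of its pair list.
def fragDict (frag : List (String × String)) : PySem.Dict String (List Char) :=
  PySem.Dict.ofList (frag.map (fun p => (p.1, p.2.toList)))

-- A's `while len(out[strain]) < count: out[strain] += '-'` in exact closed form
-- (append '-' until length n; also B's `.ljust(n, '-')`).
def padDash (s : List Char) (n : Nat) : List Char := s ++ List.replicate (n - s.length) '-'

-- body of A's inner loop: try out[strain] += frag[strain] / except KeyError: out[strain] = count*'-' + frag[strain]
def aInner (cnt : Nat) (out : PySem.Dict String (List Char)) (p : String × List Char) :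
    PySem.Dict String (List Char) :=
  out.insert p.1 (match out.get? p.1 with
    | some s => s ++ p.2
    | none => List.replicate cnt '-' ++ p.2)

-- one round of A's outer loop; `max([len(out[i]) for i in out])` raises ValueError when
-- `out` is still empty (those inputs are excluded by Pre_; the port takes 0 there).
def aStep (st : PySem.Dict String (List Char) × Nat) (frag : List (String × String)) :
    PySem.Dict String (List Char) × Nat :=
  let out1 := (fragDict frag).items.foldl (aInner st.2) st.1
  let cnt := (PySem.List.max? (out1.items.map (fun p => p.2.length)) (fun x => x)).getD 0
  (PySem.Dict.mk (out1.items.map (fun p => (p.1, padDash p.2 cnt))), cnt)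

def concatenator (fragments : List (List (String × String))) : List (String × String) :=
  ((fragments.foldl aStep (PySem.Dict.empty, 0)).1.items).map (fun p => (p.1, String.ofList p.2))

-- ===== PORT B =====
-- max((len(v) for v in frag.values()), default=0)
def widthOf (frag : List (String × String)) : Nat :=
  (PySem.List.max? (((fragDict frag).values).map List.length) (fun x => x)).getD 0

-- B's `seen`/`order` loop: strain keys in first-seen order
def keyOrder (fragments : List (List (String × String))) : List String :=
  fragments.foldl (fun acc frag => PySem.Set.update acc (fragDict frag).keys) PySem.Set.empty

-- frag.get(strain, '').ljust(w, '-')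
def blockOf (k : String) (frag : List (String × String)) : List Char :=
  padDash ((fragDict frag).getD k []) (widthOf frag)

def concatenator_alt (fragments : List (List (String × String))) : List (String × String) :=
  (keyOrder fragments).map (fun k => (k, String.ofList ((fragments.map (blockOf k)).flatten)))

-- ===== PRECONDITION & SPEC =====
-- Pre_ excludes exactly the inputs where A raises ValueError: a non-empty fragment list
-- whose FIRST fragment is the empty dict (max of an empty list on the still-empty out).
def Pre_concatenator (fragments : List (List (String × String))) : Prop :=
  fragments.head? ≠ some ([] : List (String × String))
instance (fragments : List (List (String × String))) : Decidable (Pre_concatenator fragments) := by unfold Pre_concatenator; infer_instance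

def pvWitness_concatenator : (List (List (String × String))) :=
  [[("a", "x")], [("b", "yz"), ("a", "q")]]

-- A raises ValueError when the first fragment is an empty dict; B returns the dict of the
-- keys seen (the empty dict when every fragment is empty).
def Raises_concatenator (fragments : List (List (String × String))) : Prop :=
  fragments.head? = some ([] : List (String × String))
instance (fragments : List (List (String × String))) : Decidable (Raises_concatenator fragments) := by unfold Raises_concatenator; infer_instance
def pvRaiseWitness_concatenator : (List (List (String × String))) := [[]]
def pvRaiseWitnessOut_concatenator : List (String × String) := []

def Spec_concatenator (fragments : List (List (String × String))) (out : List (String × String)) : Prop := out = concatenator_alt fragments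
instance (fragments : List (List (String × String))) (out : List (String × String)) : Decidable (Spec_concatenator fragments out) := by unfold Spec_concatenator; infer_instance

-- ===== CLAIM (what is proved, stated in full; the proofs are below) =====
def Claim_equal_concatenator : Prop := ∀ (fragments : List (List (String × String))), Dom_concatenator fragments → Pre_concatenator fragments → Spec_concatenator fragments (concatenator fragments)

def Claim_raises_concatenator : Prop := (∀ (fragments : List (List (String × String))), Dom_concatenator fragments → Raises_concatenator fragments → ¬ Pre_concatenator fragments) ∧ (Dom_concatenator (pvRaiseWitness_concatenator) ∧ Raises_concatenator (pvRaiseWitness_concatenator) ∧ concatenator_alt (pvRaiseWitness_concatenator) = pvRaiseWitnessOut_concatenator)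

-- ===== LEMMAS AND PROOFS =====

-- proof-side abbreviations
def totalW (pre : List (List (String × String))) : Nat := (pre.map widthOf).sum
def blocksOf (pre : List (List (String × String))) (k : String) : List Char :=
  (pre.map (blockOf k)).flatten

theorem padDash_length (s : List Char) (n : Nat) : (padDash s n).length = max s.length n := by
  simp [padDash]; omega

theorem max?_nil_getD : (PySem.List.max? ([] : List Nat) (fun x => x)).getD 0 = 0 := rfl

theorem padDash_eq (s : List Char) (c w : Nat) (h : s.length = c) :
    padDash s (c + w) = s ++ List.replicate w '-' := by
  subst h; simp [padDash]

theorem padDash_split (a b : List Char) (w : Nat) :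
    padDash (a ++ b) (a.length + w) = a ++ padDash b w := by
  simp [padDash]; omega

theorem len_le_width {f : List (String × String)} {v : List Char}
    (hv : v ∈ (fragDict f).values) : v.length ≤ widthOf f := by
  have hmem : v.length ∈ ((fragDict f).values).map List.length := List.mem_map_of_mem hv
  cases hmax : PySem.List.max? (((fragDict f).values).map List.length) (fun x => x) with
  | none =>
      rw [PySem.List.max?_eq_none_iff] at hmax
      rw [hmax] at hmem; simp at hmem
  | some m =>
      have := PySem.List.max?_isMax hmax _ hmem
      simpa [widthOf, hmax] using this

theorem values_of_get? {f : List (String × String)} {k : String} {v : List Char}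
    (h : (fragDict f).get? k = some v) : v ∈ (fragDict f).values := by
  have hm := PySem.Dict.mem_items_of_get?_eq_some _ h
  simpa [PySem.Dict.values] using List.mem_map_of_mem (f := Prod.snd) hm

theorem blockOf_length (k : String) (f : List (String × String)) :
    (blockOf k f).length = widthOf f := by
  unfold blockOf
  rw [padDash_length]
  cases hg : (fragDict f).get? k with
  | none =>
      rw [PySem.Dict.getD_eq_get?_getD, hg]; simp
  | some v =>
      have hle := len_le_width (values_of_get? hg)
      rw [PySem.Dict.getD_eq_get?_getD, hg]; simp; omega

theorem blocksOf_append (pre : List (List (String × String))) (f : List (String × String))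
    (k : String) : blocksOf (pre ++ [f]) k = blocksOf pre k ++ blockOf k f := by
  simp [blocksOf]

theorem totalW_append (pre : List (List (String × String))) (f : List (String × String)) :
    totalW (pre ++ [f]) = totalW pre + widthOf f := by
  simp [totalW]

theorem blocksOf_length (pre : List (List (String × String))) (k : String) :
    (blocksOf pre k).length = totalW pre := by
  induction pre with
  | nil => simp [blocksOf, totalW]
  | cons f t ih => simp [blocksOf, totalW, blockOf_length] at ih ⊢; omega

theorem not_mem_keys_getD {f : List (String × String)} {k : String}
    (h : k ∉ (fragDict f).keys) : (fragDict f).getD k [] = [] := by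
  apply PySem.Dict.getD_of_not_contains
  cases hc : (fragDict f).contains k with
  | false => rfl
  | true => exact absurd ((PySem.Dict.contains_iff_mem_keys _ _).1 hc) h

theorem blocksOf_absent (pre : List (List (String × String))) (k : String)
    (h : ∀ f ∈ pre, k ∉ (fragDict f).keys) :
    blocksOf pre k = List.replicate (totalW pre) '-' := by
  induction pre with
  | nil => simp [blocksOf, totalW]
  | cons f t ih =>
      have h1 : (fragDict f).getD k [] = [] := not_mem_keys_getD (h f (by simp))
      have h2 := ih (fun g hg => h g (by simp [hg]))
      show blockOf k f ++ blocksOf t k = _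
      rw [h2, show totalW (f :: t) = widthOf f + totalW t by simp [totalW],
        List.replicate_add]
      simp [blockOf, h1, padDash]

theorem mem_foldl_update (l : List (List (String × String))) (acc : List String) (k : String) :
    k ∈ l.foldl (fun a f => PySem.Set.update a (fragDict f).keys) acc ↔
      k ∈ acc ∨ ∃ f ∈ l, k ∈ (fragDict f).keys := by
  induction l generalizing acc with
  | nil => simp
  | cons f t ih =>
      rw [List.foldl_cons, ih, PySem.Set.mem_update]
      simp only [List.mem_cons]
      constructor
      · rintro (⟨h | h⟩ | ⟨g, hg, h⟩)
        · exact Or.inl h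
        · exact Or.inr ⟨f, Or.inl rfl, h⟩
        · exact Or.inr ⟨g, Or.inr hg, h⟩
      · rintro (h | ⟨g, (rfl | hg), h⟩)
        · exact Or.inl (Or.inl h)
        · exact Or.inl (Or.inr h)
        · exact Or.inr ⟨g, hg, h⟩

-- the inner loop's effect on keys / get?
theorem inner_keys (cnt : Nat) (l : List (String × List Char))
    (out : PySem.Dict String (List Char)) :
    (l.foldl (aInner cnt) out).keys = PySem.Set.update out.keys (l.map Prod.fst) := by
  exact PySem.Dict.keys_foldl_insert_key l Prod.fst
    (fun d p => match d.get? p.1 with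
      | some s => s ++ p.2
      | none => List.replicate cnt '-' ++ p.2) out

theorem inner_nodup (cnt : Nat) (l : List (String × List Char))
    (out : PySem.Dict String (List Char)) (h : out.keys.Nodup) :
    (l.foldl (aInner cnt) out).keys.Nodup := by
  exact PySem.Dict.nodup_keys_foldl_insert_key l Prod.fst
    (fun d p => match d.get? p.1 with
      | some s => s ++ p.2
      | none => List.replicate cnt '-' ++ p.2) out h

theorem inner_get? (cnt : Nat) (l : List (String × List Char)) :
    ∀ (out : PySem.Dict String (List Char)) (k : String), (l.map Prod.fst).Nodup →
    (l.foldl (aInner cnt) out).get? k =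
      match (PySem.Dict.mk l).get? k with
      | some v => some (match out.get? k with
          | some s => s ++ v
          | none => List.replicate cnt '-' ++ v)
      | none => out.get? k := by
  induction l with
  | nil => intro out k _; rfl
  | cons p t ih =>
      intro out k h
      have hnd : (t.map Prod.fst).Nodup := (List.nodup_cons.1 h).2
      have hpt : p.1 ∉ t.map Prod.fst := (List.nodup_cons.1 h).1
      rw [List.foldl_cons, PySem.Dict.get?_mk_cons, ih _ _ hnd]
      by_cases hk : p.1 = k
      · subst hk
        have htn : (PySem.Dict.mk t).get? p.1 = none := by
          rw [PySem.Dict.get?_eq_none_iff_not_mem_keys]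
          simpa [PySem.Dict.keys_mk] using hpt
        rw [htn]
        simp [aInner, PySem.Dict.get?_insert_self]
      · have : (aInner cnt out p).get? k = out.get? k := by
          unfold aInner
          exact PySem.Dict.get?_insert_of_ne _ _ (fun h' => hk h'.symm)
        rw [this]
        simp [beq_iff_eq, hk]

theorem get?_mk_map (g : List Char → List Char) (l : List (String × List Char)) (k : String) :
    (PySem.Dict.mk (l.map (fun p => (p.1, g p.2)))).get? k = ((PySem.Dict.mk l).get? k).map g := by
  induction l with
  | nil => rfl
  | cons p t ih =>
      obtain ⟨a, v⟩ := p
      simp only [List.map_cons, PySem.Dict.get?_mk_cons, ih]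
      split <;> rfl

-- MAIN INVARIANT: A's loop state after processing `pre` is exactly B's transposed table of `pre`.
theorem mainInv (rest : List (List (String × String))) :
    ∀ (out : PySem.Dict String (List Char)) (cnt : Nat) (pre : List (List (String × String))),
    out.keys = keyOrder pre →
    out.keys.Nodup →
    (∀ k, out.get? k = if k ∈ out.keys then some (blocksOf pre k) else none) →
    cnt = totalW pre →
    (rest.foldl aStep (out, cnt)).1.items
      = (keyOrder (pre ++ rest)).map (fun k => (k, blocksOf (pre ++ rest) k)) := by
  induction rest with
  | nil =>
      intro out cnt pre h1 h2 h3 h4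
      simp only [List.foldl_nil, List.append_nil]
      rw [PySem.Dict.items_eq_map_keys out h2 []]
      rw [h1]
      apply List.map_congr_left
      intro k hk
      have hk' : k ∈ out.keys := by rw [h1]; exact hk
      rw [PySem.Dict.getD_eq_get?_getD, h3 k, if_pos hk']
      rfl
  | cons f rest' ih =>
      intro out cnt pre h1 h2 h3 h4
      have hdnd : (fragDict f).keys.Nodup := PySem.Dict.nodup_keys_ofList _
      have hitems_fst : (fragDict f).items.map Prod.fst = (fragDict f).keys := rfl
      set out1 := (fragDict f).items.foldl (aInner cnt) out with hout1
      have hOutSome : ∀ {k : String} {s : List Char}, out.get? k = some s →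
          s = blocksOf pre k ∧ s.length = cnt := by
        intro k s hs
        have h3k := h3 k
        rw [hs] at h3k
        by_cases hm : k ∈ out.keys
        · rw [if_pos hm] at h3k
          have hse : s = blocksOf pre k := Option.some.inj h3k
          exact ⟨hse, by rw [hse, blocksOf_length, h4]⟩
        · rw [if_neg hm] at h3k; exact absurd h3k (by simp)
      have hK : out1.keys = PySem.Set.update out.keys (fragDict f).keys := by
        rw [hout1, inner_keys, hitems_fst]
      have hN : out1.keys.Nodup := inner_nodup _ _ _ h2
      have hG : ∀ k, out1.get? k =
          match (fragDict f).get? k with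
          | some v => some (match out.get? k with
              | some s => s ++ v
              | none => List.replicate cnt '-' ++ v)
          | none => out.get? k := by
        intro k
        have h' := inner_get? cnt (fragDict f).items out k (by rw [hitems_fst]; exact hdnd)
        rw [show PySem.Dict.mk (fragDict f).items = fragDict f from rfl] at h'
        exact h'
      have hBound : ∀ p ∈ out1.items, p.2.length ≤ cnt + widthOf f := by
        intro p hp
        have hpg : out1.get? p.1 = some p.2 :=
          (PySem.Dict.get?_eq_some_iff_mem_items _ _ _ hN).2 hp
        rw [hG p.1] at hpg
        cases hd : (fragDict f).get? p.1 with
        | some v =>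
            rw [hd] at hpg
            have hvle : v.length ≤ widthOf f := len_le_width (values_of_get? hd)
            cases ho : out.get? p.1 with
            | some s =>
                rw [ho] at hpg
                have := (hOutSome ho).2
                have hpe : p.2 = s ++ v := (Option.some.inj hpg).symm
                rw [hpe]; simp; omega
            | none =>
                rw [ho] at hpg
                have hpe : p.2 = List.replicate cnt '-' ++ v := (Option.some.inj hpg).symm
                rw [hpe]; simp; omega
        | none =>
            rw [hd] at hpg
            have := (hOutSome hpg).2
            omega
      have hWit : out1.items ≠ [] → ∃ p ∈ out1.items, p.2.length = cnt + widthOf f := by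
        intro hne
        by_cases hdi : (fragDict f).items = []
        · have hw0 : widthOf f = 0 := by simp [widthOf, PySem.Dict.values, hdi, max?_nil_getD]
          have hout1eq : out1 = out := by rw [hout1, hdi]; rfl
          obtain ⟨p, hp⟩ := List.exists_mem_of_ne_nil _ hne
          refine ⟨p, hp, ?_⟩
          rw [hout1eq] at hp
          have hpg : out.get? p.1 = some p.2 :=
            (PySem.Dict.get?_eq_some_iff_mem_items _ _ _ h2).2 hp
          have := (hOutSome hpg).2
          omega
        · have hvne : ((fragDict f).values.map List.length) ≠ [] := by
            simp [PySem.Dict.values, hdi]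
          cases hmax : PySem.List.max? ((fragDict f).values.map List.length) (fun x => x) with
          | none => rw [PySem.List.max?_eq_none_iff] at hmax; exact absurd hmax hvne
          | some m =>
              have hwm : widthOf f = m := by simp [widthOf, hmax]
              obtain ⟨v, hv, hvl⟩ := List.mem_map.1 (PySem.List.max?_mem hmax)
              have hv' : ∃ a, (a, v) ∈ (fragDict f).items := by
                simpa [PySem.Dict.values] using hv
              obtain ⟨a, ha⟩ := hv'
              have hdg : (fragDict f).get? a = some v :=
                (PySem.Dict.get?_eq_some_iff_mem_items _ _ _ hdnd).2 ha
              have h1g := hG a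
              rw [hdg] at h1g
              cases ho : out.get? a with
              | some s =>
                  rw [ho] at h1g
                  refine ⟨(a, s ++ v), PySem.Dict.mem_items_of_get?_eq_some _ h1g, ?_⟩
                  have := (hOutSome ho).2
                  simp only [List.length_append]
                  rw [hvl, hwm]; omega
              | none =>
                  rw [ho] at h1g
                  refine ⟨(a, List.replicate cnt '-' ++ v),
                    PySem.Dict.mem_items_of_get?_eq_some _ h1g, ?_⟩
                  simp only [List.length_append, List.length_replicate]
                  rw [hvl, hwm]
      set cnt1 := (PySem.List.max? (out1.items.map (fun p => p.2.length)) (fun x => x)).getD 0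
        with hcnt1def
      have hcnt1 : cnt1 = cnt + widthOf f := by
        by_cases hne : out1.items = []
        · have hz : cnt1 = 0 := by simp [hcnt1def, hne, max?_nil_getD]
          have hkeys : PySem.Set.update out.keys (fragDict f).keys = [] := by
            rw [← hK]; simp [PySem.Dict.keys, hne]
          have hok : out.keys = [] := by
            rw [List.eq_nil_iff_forall_not_mem]
            intro x hx
            have : x ∈ PySem.Set.update out.keys (fragDict f).keys :=
              (PySem.Set.mem_update _ _ _).2 (Or.inl hx)
            rw [hkeys] at this; simp at this
          have hdk : (fragDict f).keys = [] := by
            rw [List.eq_nil_iff_forall_not_mem]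
            intro x hx
            have : x ∈ PySem.Set.update out.keys (fragDict f).keys :=
              (PySem.Set.mem_update _ _ _).2 (Or.inr hx)
            rw [hkeys] at this; simp at this
          have hdi : (fragDict f).items = [] := by
            have := hdk
            simpa [PySem.Dict.keys, List.map_eq_nil_iff] using this
          have hw0 : widthOf f = 0 := by simp [widthOf, PySem.Dict.values, hdi, max?_nil_getD]
          have hcnt0 : cnt = 0 := by
            rw [h4]
            refine List.sum_eq_zero ?_
            intro x hx
            obtain ⟨g, hg, rfl⟩ := List.mem_map.1 hx
            have hgk : (fragDict g).keys = [] := by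
              rw [List.eq_nil_iff_forall_not_mem]
              intro y hy
              have hmem : y ∈ keyOrder pre :=
                (mem_foldl_update pre _ y).2 (Or.inr ⟨g, hg, hy⟩)
              rw [← h1, hok] at hmem; simp at hmem
            have hgi : (fragDict g).items = [] := by
              simpa [PySem.Dict.keys, List.map_eq_nil_iff] using hgk
            simp [widthOf, PySem.Dict.values, hgi, max?_nil_getD]
          omega
        · obtain ⟨p, hp, hpl⟩ := hWit hne
          have hlne : out1.items.map (fun p => p.2.length) ≠ [] := by simp [hne]
          cases hmax : PySem.List.max? (out1.items.map (fun p => p.2.length)) (fun x => x) with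
          | none => rw [PySem.List.max?_eq_none_iff] at hmax; exact absurd hmax hlne
          | some m =>
              obtain ⟨q, hq, hql⟩ := List.mem_map.1 (PySem.List.max?_mem hmax)
              have hub : m ≤ cnt + widthOf f := by rw [← hql]; exact hBound q hq
              have hlb : cnt + widthOf f ≤ m := by
                have := PySem.List.max?_isMax hmax (p.2.length)
                  (List.mem_map_of_mem hp)
                simpa [hpl] using this
              rw [hcnt1def, hmax]
              simp; omega
      set out2 := PySem.Dict.mk (out1.items.map (fun p => (p.1, padDash p.2 cnt1)))
        with hout2
      have hK2 : out2.keys = out1.keys := by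
        rw [hout2, PySem.Dict.keys_mk, List.map_map]; rfl
      have hG2 : ∀ k, out2.get? k = (out1.get? k).map (fun s => padDash s cnt1) := by
        intro k
        have h' := get?_mk_map (fun s => padDash s cnt1) out1.items k
        rw [show PySem.Dict.mk out1.items = out1 from rfl] at h'
        exact h'
      have hI1 : out2.keys = keyOrder (pre ++ [f]) := by
        rw [hK2, hK, h1]
        simp [keyOrder, List.foldl_append]
      have hI2 : out2.keys.Nodup := hK2 ▸ hN
      have hI3 : ∀ k, out2.get? k =
          if k ∈ out2.keys then some (blocksOf (pre ++ [f]) k) else none := by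
        intro k
        rw [hG2, hG k]
        by_cases hmem : k ∈ out2.keys
        · rw [if_pos hmem]
          have hor : k ∈ out.keys ∨ k ∈ (fragDict f).keys := by
            have : k ∈ PySem.Set.update out.keys (fragDict f).keys := by
              rw [← hK, ← hK2]; exact hmem
            exact (PySem.Set.mem_update _ _ _).1 this
          cases hd : (fragDict f).get? k with
          | some v =>
              have hgd : (fragDict f).getD k [] = v := by
                rw [PySem.Dict.getD_eq_get?_getD, hd]; rfl
              cases ho : out.get? k with
              | some s =>
                  obtain ⟨hs, hsl⟩ := hOutSome ho
                  simp only [Option.map_some]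
                  rw [blocksOf_append, hs, hcnt1,
                    show cnt + widthOf f = (blocksOf pre k).length + widthOf f by
                      rw [blocksOf_length, h4],
                    padDash_split]
                  simp [blockOf, hgd]
              | none =>
                  have hnm : k ∉ out.keys :=
                    (PySem.Dict.get?_eq_none_iff_not_mem_keys _ _).1 ho
                  have habs : ∀ g ∈ pre, k ∉ (fragDict g).keys := by
                    intro g hg hx
                    exact hnm (by
                      rw [h1]
                      exact (mem_foldl_update pre _ k).2 (Or.inr ⟨g, hg, hx⟩))
                  simp only [Option.map_some]
                  rw [blocksOf_append, blocksOf_absent pre k habs, hcnt1, h4,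
                    show totalW pre + widthOf f
                        = (List.replicate (totalW pre) '-').length + widthOf f by simp,
                    padDash_split]
                  simp [blockOf, hgd]
          | none =>
              have hnd2 : k ∉ (fragDict f).keys :=
                (PySem.Dict.get?_eq_none_iff_not_mem_keys _ _).1 hd
              have hmo : k ∈ out.keys := by
                rcases hor with h | h
                · exact h
                · exact absurd h hnd2
              have h3k := h3 k
              rw [if_pos hmo] at h3k
              rw [h3k]
              simp only [Option.map_some]
              have hbf : blockOf k f = List.replicate (widthOf f) '-' := by
                simp [blockOf, not_mem_keys_getD hnd2, padDash]
              rw [blocksOf_append, hcnt1,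
                padDash_eq _ _ _ (by rw [blocksOf_length, ← h4]), hbf]
        · rw [if_neg hmem]
          have hmem1 : k ∉ PySem.Set.update out.keys (fragDict f).keys := by
            rw [← hK, ← hK2]; exact hmem
          have hnd2 : k ∉ (fragDict f).keys := fun h =>
            hmem1 ((PySem.Set.mem_update _ _ _).2 (Or.inr h))
          have hno : k ∉ out.keys := fun h =>
            hmem1 ((PySem.Set.mem_update _ _ _).2 (Or.inl h))
          rw [(PySem.Dict.get?_eq_none_iff_not_mem_keys _ _).2 hnd2,
            (PySem.Dict.get?_eq_none_iff_not_mem_keys _ _).2 hno]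
          rfl
      have hI4 : cnt1 = totalW (pre ++ [f]) := by rw [hcnt1, totalW_append, h4]
      rw [List.foldl_cons]
      have hstep : aStep (out, cnt) f = (out2, cnt1) := rfl
      rw [hstep]
      have hfin := ih out2 cnt1 (pre ++ [f]) hI1 hI2 hI3 hI4
      rw [List.append_assoc] at hfin
      simpa using hfin

-- ===== VERDICT (by name: the statement is the Claim_ definition above) =====
theorem concatenator_spec : Claim_equal_concatenator := by
  intro fragments _ _
  unfold Spec_concatenator concatenator concatenator_alt
  have h := mainInv fragments PySem.Dict.empty 0 []
    (by rfl) (by simp [PySem.Dict.keys_empty]) (by intro k; simp [PySem.Dict.get?_empty, PySem.Dict.keys_empty]) (by rfl)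
  rw [List.nil_append] at h
  rw [h, List.map_map]
  rfl

theorem concatenator_raises : Claim_raises_concatenator := by
  unfold Claim_raises_concatenator
  constructor
  · intro fragments _ hr
    unfold Pre_concatenator
    unfold Raises_concatenator at hr
    simp [hr]
  · exact ⟨by decide, by decide, by decide⟩

-- self-check: B's port really returns the stated value at the raise witness
theorem concatenator_raises_witness_ok :
    concatenator_alt pvRaiseWitness_concatenator = pvRaiseWitnessOut_concatenator :=
  concatenator_raises.2.2.2
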